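-- pv_equiv track=rewrite | github.com/Srilekha-03/DSA | Difficulty: Medium/Max Xor Subarray of size K/max-xor-subarray-of-size-k.py | maxSubarrayXOR
-- ===== SOURCE A (Python) =====
-- def maxSubarrayXOR(arr, k):
--     xor=0
--     n=len(arr)
--     for i in range(k):
--         xor^=arr[i]
--     ans=xor
--     i=0
--     j=k
--     while j<n:
--         xor^=arr[j]
--         xor^=arr[i]
--         i+=1
--         ans=max(ans,xor)
--         j+=1
--     return ans
-- ===== SOURCE B (Python) =====
-- def maxSubarrayXOR(arr, k):
--     # prefix-XOR table: window XOR arr[i..i+k) == prefix[i+k] ^ prefix[i]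
--     n = len(arr)
--     prefix = [0]
--     acc = 0
--     for x in arr:
--         acc = acc ^ x
--         prefix.append(acc)
--     ans = prefix[k] ^ prefix[0]
--     for i in range(1, n - k + 1):
--         ans = max(ans, prefix[i + k] ^ prefix[i])
--     return ans
-- ===== Notes on version B (the rewrite author's own statement) =====
-- stated objective: alternative
-- what changed: B precomputes a prefix-XOR table once and reads each window's XOR as prefix[i+k]^prefix[i], instead of A's sliding window that XORs the entering and leaving element on every step; the max is taken over direct table lookups.
import Mathlib
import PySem

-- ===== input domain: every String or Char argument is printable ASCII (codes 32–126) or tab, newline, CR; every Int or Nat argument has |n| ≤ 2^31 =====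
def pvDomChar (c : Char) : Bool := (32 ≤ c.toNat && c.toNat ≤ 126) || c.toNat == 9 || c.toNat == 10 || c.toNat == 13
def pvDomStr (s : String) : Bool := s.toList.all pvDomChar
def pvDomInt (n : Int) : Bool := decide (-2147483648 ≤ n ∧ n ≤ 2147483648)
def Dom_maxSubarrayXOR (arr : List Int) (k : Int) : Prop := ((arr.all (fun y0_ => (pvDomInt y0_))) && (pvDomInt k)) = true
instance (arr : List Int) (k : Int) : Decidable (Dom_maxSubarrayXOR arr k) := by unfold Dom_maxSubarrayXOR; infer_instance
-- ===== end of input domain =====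

-- B replaces A's sliding-window XOR update by a prefix-XOR table read per window; equally fast, different decomposition.

-- ===== PORT A =====
def maxSubarrayXOR (arr : List Int) (k : Int) : Int :=
  let n : Int := arr.length
  let x0 : Int := (PySem.List.pyRange 0 k 1).foldl
    (fun x i => PySem.Int.bxor x (PySem.List.pyGetD arr i 0)) 0
  let st := (PySem.List.pyRange k n 1).foldl
    (fun (st : Int × Int × Int) j =>
      let x := PySem.Int.bxor (PySem.Int.bxor st.1 (PySem.List.pyGetD arr j 0)) (PySem.List.pyGetD arr st.2.1 0)
      (x, st.2.1 + 1, max st.2.2 x)) (x0, 0, x0)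
  st.2.2

-- ===== PORT B =====
def maxSubarrayXOR_alt (arr : List Int) (k : Int) : Int :=
  let n : Int := arr.length
  let pre : List Int := (arr.foldl
    (fun (s : Int × List Int) x => (PySem.Int.bxor s.1 x, s.2 ++ [PySem.Int.bxor s.1 x]))
    (0, ([0] : List Int))).2
  let ans0 : Int := PySem.Int.bxor (PySem.List.pyGetD pre k 0) (PySem.List.pyGetD pre 0 0)
  (PySem.List.pyRange 1 (n - k + 1) 1).foldl
    (fun ans i => max ans (PySem.Int.bxor (PySem.List.pyGetD pre (i + k) 0) (PySem.List.pyGetD pre i 0))) ans0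

-- ===== PRECONDITION & SPEC =====
-- A raises IndexError on every input with k < 0 (the sliding index i runs past the end;
-- on k < 0 with arr = [] it indexes arr[-1]) and with k > len(arr); Pre_ keeps exactly 0 ≤ k ≤ len(arr).
def Pre_maxSubarrayXOR (arr : List Int) (k : Int) : Prop := 0 ≤ k ∧ k ≤ arr.length
instance (arr : List Int) (k : Int) : Decidable (Pre_maxSubarrayXOR arr k) := by
  unfold Pre_maxSubarrayXOR; infer_instance
def pvWitness_maxSubarrayXOR : List Int × Int := ([1, 2, 3, 4], 2)

def Spec_maxSubarrayXOR (arr : List Int) (k : Int) (out : Int) : Prop := out = maxSubarrayXOR_alt arr k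
instance (arr : List Int) (k : Int) (out : Int) : Decidable (Spec_maxSubarrayXOR arr k out) := by
  unfold Spec_maxSubarrayXOR; infer_instance

-- ===== CLAIM (what is proved, stated in full; the proofs are below) =====
def Claim_equal_maxSubarrayXOR : Prop := ∀ (arr : List Int) (k : Int), Dom_maxSubarrayXOR arr k → Pre_maxSubarrayXOR arr k → Spec_maxSubarrayXOR arr k (maxSubarrayXOR arr k)

-- ===== LEMMAS AND PROOFS =====

theorem pv_bxor_assoc (a b c : Int) :
    PySem.Int.bxor (PySem.Int.bxor a b) c = PySem.Int.bxor a (PySem.Int.bxor b c) := by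
  unfold PySem.Int.bxor
  rcases a with m | m <;> rcases b with n | n <;> rcases c with p | p <;>
    simp [Int.negSucc_eq, Nat.xor_assoc, show ∀ q : Nat, ¬((q : Int) ≤ -1) from fun q => by omega] <;>
    omega

theorem pv_bxor_left_comm (a b c : Int) :
    PySem.Int.bxor a (PySem.Int.bxor b c) = PySem.Int.bxor b (PySem.Int.bxor a c) := by
  rw [← pv_bxor_assoc, PySem.Int.bxor_comm a b, pv_bxor_assoc]

-- prefix XOR of the first m elements
def pX (arr : List Int) (m : Nat) : Int := (arr.take m).foldl PySem.Int.bxor 0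

-- XOR of the window of length K starting at i
def wX (arr : List Int) (K i : Nat) : Int := PySem.Int.bxor (pX arr (i + K)) (pX arr i)

theorem pX_succ (arr : List Int) (m : Nat) (h : m < arr.length) :
    pX arr (m + 1) = PySem.Int.bxor (pX arr m) (arr.getD m 0) := by
  unfold pX
  rw [List.take_add_one, List.foldl_append]
  simp [List.getElem?_eq_getElem h, List.getD]

theorem pv_step (arr : List Int) (K t : Nat) (h1 : K + t < arr.length) :
    PySem.Int.bxor (PySem.Int.bxor (wX arr K t) (arr.getD (K + t) 0)) (arr.getD t 0)
      = wX arr K (t + 1) := by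
  have ht : t < arr.length := by omega
  unfold wX
  rw [show t + 1 + K = (t + K) + 1 by omega, pX_succ arr (t + K) (by omega), pX_succ arr t ht,
    show t + K = K + t by omega]
  simp only [pv_bxor_assoc, pv_bxor_left_comm]

-- the running prefix list built by B's fold
def pfx (a : Int) : List Int → List Int
  | [] => []
  | x :: t => PySem.Int.bxor a x :: pfx (PySem.Int.bxor a x) t

theorem pv_foldB (l : List Int) : ∀ (a : Int) (p : List Int),
    l.foldl (fun (s : Int × List Int) x => (PySem.Int.bxor s.1 x, s.2 ++ [PySem.Int.bxor s.1 x])) (a, p)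
      = (l.foldl PySem.Int.bxor a, p ++ pfx a l) := by
  induction l with
  | nil => intro a p; simp [pfx]
  | cons x t ih =>
      intro a p
      simp only [List.foldl_cons, pfx, ih]
      simp

theorem pv_pfx_getD (l : List Int) : ∀ (a : Int) (m : Nat), m < l.length →
    (pfx a l).getD m 0 = (l.take (m + 1)).foldl PySem.Int.bxor a := by
  induction l with
  | nil => intro a m h; simp at h
  | cons x t ih =>
      intro a m h
      cases m with
      | zero => simp [pfx]
      | succ m =>
          have : m < t.length := by simpa using h
          simp only [pfx, List.getD_cons_succ]
          exact ih (PySem.Int.bxor a x) m this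

theorem pv_pre_getD (arr : List Int) (m : Nat) (h : m ≤ arr.length) :
    (0 :: pfx 0 arr).getD m 0 = pX arr m := by
  cases m with
  | zero => simp [pX]
  | succ m =>
      have hm : m < arr.length := by omega
      simpa [pX] using pv_pfx_getD arr 0 m hm

theorem pv_x0 (arr : List Int) (K : Nat) (h : K ≤ arr.length) :
    (List.range K).foldl (fun x t => PySem.Int.bxor x (arr.getD t 0)) 0 = pX arr K := by
  induction K with
  | zero => simp [pX]
  | succ K ih =>
      have hK : K ≤ arr.length := by omega
      rw [List.range_succ, List.foldl_append, ih hK]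
      simp [pX_succ arr K (by omega)]

-- invariant of A's while loop
theorem pv_Aloop (arr : List Int) (K : Nat) :
    ∀ (r t : Nat) (ans : Int), K + t + r = arr.length →
    (((PySem.List.pyRange ((K : Int) + (t : Int)) (arr.length) 1).foldl
      (fun (st : Int × Int × Int) j =>
        let x := PySem.Int.bxor (PySem.Int.bxor st.1 (PySem.List.pyGetD arr j 0)) (PySem.List.pyGetD arr st.2.1 0)
        (x, st.2.1 + 1, max st.2.2 x)) (wX arr K t, (t : Int), ans))).2.2
      = (List.range r).foldl (fun a s => max a (wX arr K (t + 1 + s))) ans := by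
  intro r
  induction r with
  | zero =>
      intro t ans h
      rw [PySem.List.pyRange_one_eq_nil (by omega)]
      simp
  | succ r ih =>
      intro t ans h
      rw [PySem.List.pyRange_one_cons (by omega)]
      simp only [List.foldl_cons]
      have hKt : ((K : Int) + (t : Int)) = ((K + t : Nat) : Int) := by push_cast; ring
      have hgj : PySem.List.pyGetD arr ((K : Int) + (t : Int)) 0 = arr.getD (K + t) 0 := by
        rw [hKt, PySem.List.pyGetD_natCast]
      have hgi : PySem.List.pyGetD arr ((t : Nat) : Int) 0 = arr.getD t 0 := by
        rw [PySem.List.pyGetD_natCast]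
      have hx : PySem.Int.bxor (PySem.Int.bxor (wX arr K t) (PySem.List.pyGetD arr ((K : Int) + (t : Int)) 0))
          (PySem.List.pyGetD arr ((t : Nat) : Int) 0) = wX arr K (t + 1) := by
        rw [hgj, hgi, pv_step arr K t (by omega)]
      simp only [hx]
      have h1 : ((K : Int) + (t : Int)) + 1 = (K : Int) + ((t + 1 : Nat) : Int) := by push_cast [Nat.cast_add]; ring
      have h2 : ((t : Nat) : Int) + 1 = ((t + 1 : Nat) : Int) := by push_cast; ring
      rw [h1, h2, ih (t + 1) (max ans (wX arr K (t + 1))) (by omega)]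
      rw [List.range_succ_eq_map]
      simp only [List.foldl_cons, List.foldl_map, Nat.add_zero]
      have : (fun (a : Int) (s : Nat) => max a (wX arr K (t + 1 + (s + 1))))
           = (fun (a : Int) (s : Nat) => max a (wX arr K (t + 1 + 1 + s))) := by
        funext a s; rw [show t + 1 + (s + 1) = t + 1 + 1 + s by omega]
      rw [this]

theorem maxSubarrayXOR_A_eq (arr : List Int) (K : Nat) (h : K ≤ arr.length) :
    maxSubarrayXOR arr (K : Int)
      = (List.range (arr.length - K)).foldl (fun a s => max a (wX arr K (s + 1))) (wX arr K 0) := by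
  unfold maxSubarrayXOR
  simp only []
  have hx0 : (PySem.List.pyRange 0 (K : Int) 1).foldl
      (fun x i => PySem.Int.bxor x (PySem.List.pyGetD arr i 0)) 0 = wX arr K 0 := by
    rw [PySem.List.pyRange_one]
    simp only [List.foldl_map]
    have : ∀ (x : Int) (t : Nat), PySem.Int.bxor x (PySem.List.pyGetD arr ((0 : Int) + (t : Nat)) 0)
        = PySem.Int.bxor x (arr.getD t 0) := by
      intro x t
      rw [show (0 : Int) + (t : Nat) = ((t : Nat) : Int) by ring, PySem.List.pyGetD_natCast]
    simp only [this]
    rw [show ((K : Int) - 0).toNat = K by omega, pv_x0 arr K h]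
    simp [wX, pX]
  rw [hx0]
  have := pv_Aloop arr K (arr.length - K) 0 (wX arr K 0) (by omega)
  simp only [Nat.cast_zero, add_zero] at this
  rw [this]
  have : (fun (a : Int) (s : Nat) => max a (wX arr K (0 + 1 + s)))
       = (fun (a : Int) (s : Nat) => max a (wX arr K (s + 1))) := by
    funext a s; rw [show 0 + 1 + s = s + 1 by omega]
  rw [this]

theorem maxSubarrayXOR_B_eq (arr : List Int) (K : Nat) (h : K ≤ arr.length) :
    maxSubarrayXOR_alt arr (K : Int)
      = (List.range (arr.length - K)).foldl (fun a s => max a (wX arr K (s + 1))) (wX arr K 0) := by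
  unfold maxSubarrayXOR_alt
  simp only []
  rw [pv_foldB arr 0 [0]]
  have hpre : ∀ (m : Nat), m ≤ arr.length →
      PySem.List.pyGetD ([0] ++ pfx 0 arr) ((m : Nat) : Int) 0 = pX arr m := by
    intro m hm
    rw [PySem.List.pyGetD_natCast]
    simpa using pv_pre_getD arr m hm
  have hans0 : PySem.Int.bxor (PySem.List.pyGetD ([0] ++ pfx 0 arr) (K : Int) 0)
      (PySem.List.pyGetD ([0] ++ pfx 0 arr) 0 0) = wX arr K 0 := by
    rw [show (0 : Int) = ((0 : Nat) : Int) by norm_num] at *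
    rw [hpre K h, hpre 0 (by omega)]
    simp [wX, pX]
  rw [hans0]
  rw [PySem.List.pyRange_one]
  simp only [List.foldl_map]
  rw [show (((arr.length : Int)) - (K : Int) + 1 - 1).toNat = arr.length - K by omega]
  apply PySem.List.foldl_congr_mem
  intro a s hs
  have hs' : s < arr.length - K := List.mem_range.mp hs
  have e1 : (1 : Int) + (s : Nat) + (K : Int) = ((s + 1 + K : Nat) : Int) := by push_cast; ring
  have e2 : (1 : Int) + (s : Nat) = ((s + 1 : Nat) : Int) := by push_cast; ring
  rw [e1, e2, PySem.List.pyGetD_natCast, PySem.List.pyGetD_natCast]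
  have g1 := pv_pre_getD arr (s + 1 + K) (by omega)
  have g2 := pv_pre_getD arr (s + 1) (by omega)
  simp only [List.singleton_append] at *
  rw [g1, g2]
  rfl

-- ===== VERDICT (by name: the statement is the Claim_ definition above) =====
theorem maxSubarrayXOR_spec : Claim_equal_maxSubarrayXOR := by
  intro arr k _ hPre
  obtain ⟨hk0, hkn⟩ := hPre
  unfold Spec_maxSubarrayXOR
  have hk : k = ((k.toNat : Nat) : Int) := (Int.toNat_of_nonneg hk0).symm
  rw [hk, maxSubarrayXOR_A_eq arr k.toNat (by omega), maxSubarrayXOR_B_eq arr k.toNat (by omega)]
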